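-- pv_equiv track=rewrite | github.com/BoB14th-AparT/A3-GUI | Logic/runner_scripts/clean_corrupted_paths.py | extract_valid_paths
-- ===== SOURCE A (Python) =====
-- def is_corrupted_char(c: str) -> bool:
--     """제어 문자나 깨진 문자 판단"""
--     code = ord(c)
--     return (
--         code < 0x20 or  # 제어 문자 (탭, 개행 제외하려면 code < 0x20 and c not in '\t\n\r')
--         (0x7F <= code <= 0x9F) or  # DEL + 제어 문자
--         c == '\ufffd'  # Unicode replacement character
--     )
--
-- def is_valid_android_path(path: str) -> bool:
--     """유효한 Android 경로인지 확인"""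
--     if not path or len(path) < 2:
--         return False
--
--     # Android 표준 경로 패턴
--     valid_roots = [
--         '/data/data/',
--         '/data/user/',
--         '/data/user_de/',
--         '/data/app/',
--         '/data/misc/',
--         '/sdcard/',
--         '/storage/'
--     ]
--
--     return any(path.startswith(root) for root in valid_roots)
--
-- def extract_valid_paths(text: str) -> list:
--     """
--     텍스트에서 유효한 경로들을 추출
--
--     알고리즘:
--     1. 문자를 하나씩 스캔
--     2. '/'를 만나면 경로 시작 가능성
--     3. 깨진 문자를 만나면 현재 경로 종료
--     4. 유효한 경로만 수집
--     """
--     if not text: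
--         return []
--
--     paths = []
--     current = []
--     in_path = False
--
--     for char in text:
--         if is_corrupted_char(char):
--             # 깨진 문자 발견 → 현재 경로 저장
--             if current:
--                 path = ''.join(current).strip()
--                 if is_valid_android_path(path):
--                     paths.append(path)
--             current = []
--             in_path = False
--
--         elif char == '/':
--             # 경로 시작 또는 구분자
--             current.append(char)
--             in_path = True
--
--         elif in_path:
--             # 경로 내부 문자 (일반 문자만)
--             current.append(char)
--
--         else:
--             # 경로 밖 문자는 무시
--             pass
--
--     # 마지막 경로 처리
--     if current:
--         path = ''.join(current).strip()
--         if is_valid_android_path(path):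
--             paths.append(path)
--
--     return paths
-- ===== SOURCE B (Python) =====
-- def is_corrupted_char(c: str) -> bool:
--     code = ord(c)
--     return (
--         code < 0x20 or
--         (0x7F <= code <= 0x9F) or
--         c == '\ufffd'
--     )
--
-- def is_valid_android_path(path: str) -> bool:
--     if not path or len(path) < 2:
--         return False
--     valid_roots = [
--         '/data/data/',
--         '/data/user/',
--         '/data/user_de/',
--         '/data/app/',
--         '/data/misc/',
--         '/sdcard/',
--         '/storage/'
--     ]
--     return any(path.startswith(root) for root in valid_roots)
--
-- def extract_valid_paths(text: str) -> list:
--     """Tokenize at corrupted characters, then process each clean segment."""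
--     if not text:
--         return []
--     # phase 1: split into segments at every corrupted character
--     segments = []
--     cur = []
--     for c in text:
--         if is_corrupted_char(c):
--             segments.append(cur)
--             cur = []
--         else:
--             cur.append(c)
--     segments.append(cur)
--     # phase 2: in each segment keep everything from the first '/' on
--     paths = []
--     for seg in segments:
--         if '/' in seg:
--             p = ''.join(seg[seg.index('/'):]).strip()
--             if is_valid_android_path(p):
--                 paths.append(p)
--     return paths
-- ===== Notes on version B (the rewrite author's own statement) =====
-- stated objective: alternative
-- what changed: Replaces the single-pass in_path state machine with a two-phase pipeline: first tokenize the text into segments at corrupted characters, then process each segment independently (keep from its first '/' on, strip, validate).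
import Mathlib
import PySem

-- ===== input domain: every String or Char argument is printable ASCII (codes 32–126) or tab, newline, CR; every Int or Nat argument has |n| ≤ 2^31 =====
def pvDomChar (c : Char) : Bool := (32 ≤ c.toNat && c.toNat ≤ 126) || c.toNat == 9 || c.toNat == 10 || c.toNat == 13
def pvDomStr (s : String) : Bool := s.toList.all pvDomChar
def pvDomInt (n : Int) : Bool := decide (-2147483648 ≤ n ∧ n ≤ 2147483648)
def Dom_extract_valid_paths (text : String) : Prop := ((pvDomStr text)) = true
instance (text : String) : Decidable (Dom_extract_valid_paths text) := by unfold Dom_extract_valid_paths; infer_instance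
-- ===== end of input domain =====

-- B replaces A's in_path state machine by a tokenize-then-process pipeline (same cost, different decomposition); return values proved equal.

-- shared module helpers (both Python versions use the same is_corrupted_char / is_valid_android_path)
def pvCorrupted (c : Char) : Bool :=
  decide (c.toNat < 0x20) || (decide (0x7F ≤ c.toNat) && decide (c.toNat ≤ 0x9F)) || (c == '\ufffd')

def pvRoots : List (List Char) :=
  ["/data/data/".toList, "/data/user/".toList, "/data/user_de/".toList,
   "/data/app/".toList, "/data/misc/".toList, "/sdcard/".toList, "/storage/".toList]

def pvValid (p : List Char) : Bool :=
  if p.isEmpty || p.length < 2 then false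
  else pvRoots.any (fun r => PySem.Chars.startswith p r)

-- ===== PORT A =====
-- A's loop body: state = (paths, current, in_path)
def stepA (st : List String × List Char × Bool) (c : Char) : List String × List Char × Bool :=
  if pvCorrupted c then
    (if st.2.1.isEmpty then (st.1, [], false)
     else
       let p := PySem.Chars.strip st.2.1
       if pvValid p then (st.1 ++ [String.ofList p], [], false) else (st.1, [], false))
  else if c = '/' then (st.1, st.2.1 ++ [c], true)
  else if st.2.2 then (st.1, st.2.1 ++ [c], st.2.2)
  else st

-- A's trailing flush of the last current buffer
def finishA (fin : List String × List Char × Bool) : List String :=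
  if fin.2.1.isEmpty then fin.1
  else
    let p := PySem.Chars.strip fin.2.1
    if pvValid p then fin.1 ++ [String.ofList p] else fin.1

def extract_valid_paths (text : String) : List String :=
  if text = "" then []
  else finishA (text.toList.foldl stepA ([], [], false))

-- ===== PORT B =====
-- phase-1 loop body: split at corrupted characters; state = (segments, cur)
def stepB (st : List (List Char) × List Char) (c : Char) : List (List Char) × List Char :=
  if pvCorrupted c then (st.1 ++ [st.2], []) else (st.1, st.2 ++ [c])

-- phase-2 loop body: keep everything from the first '/' on, strip, validate
def emitStep (paths : List String) (seg : List Char) : List String :=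
  if '/' ∈ seg then
    -- seg[seg.index('/'):] : index? returns some i with 0 ≤ i ≤ len, so the slice is List.drop i
    let p := PySem.Chars.strip (seg.drop ((PySem.List.index? seg '/').getD 0))
    if pvValid p then paths ++ [String.ofList p] else paths
  else paths

def extract_valid_paths_alt (text : String) : List String :=
  if text = "" then []
  else
    let sp := text.toList.foldl stepB ([], [])
    let segments := sp.1 ++ [sp.2]
    segments.foldl emitStep []

-- ===== PRECONDITION & SPEC =====
def Spec_extract_valid_paths (text : String) (out : List String) : Prop := out = extract_valid_paths_alt text
instance (text : String) (out : List String) : Decidable (Spec_extract_valid_paths text out) := by unfold Spec_extract_valid_paths; infer_instance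

-- ===== CLAIM (what is proved, stated in full; the proofs are below) =====
def Claim_equal_extract_valid_paths : Prop := ∀ (text : String), Dom_extract_valid_paths text → Spec_extract_valid_paths text (extract_valid_paths text)

-- ===== LEMMAS AND PROOFS =====

-- flush a buffer: strip it, keep it if valid
def flushE (cur : List Char) : List String :=
  let p := PySem.Chars.strip cur
  if pvValid p then [String.ofList p] else []

-- what B does to one fresh segment
def emitF (seg : List Char) : List String := flushE (seg.dropWhile (· ≠ '/'))

-- A's state machine with the accumulator factored out
def specS (cur : List Char) : List Char → List String
  | [] => flushE cur
  | c :: cs =>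
    if pvCorrupted c then flushE cur ++ specS [] cs
    else if c = '/' then specS (cur ++ [c]) cs
    else if cur.isEmpty then specS cur cs
    else specS (cur ++ [c]) cs

-- right-fold characterisation of B's split: (first segment, later segments)
def splitP : List Char → List Char × List (List Char)
  | [] => ([], [])
  | c :: cs =>
    let r := splitP cs
    if pvCorrupted c then ([], r.1 :: r.2) else (c :: r.1, r.2)

theorem flushE_nil : flushE [] = [] := by decide

theorem stepA_corr {c : Char} (hc : pvCorrupted c = true)
    (paths : List String) (cur : List Char) (b : Bool) :
    stepA (paths, cur, b) c = (paths ++ flushE cur, [], false) := by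
  by_cases h : cur.isEmpty
  · simp [stepA, hc, List.isEmpty_iff.mp h, flushE_nil]
  · by_cases hv : pvValid (PySem.Chars.strip cur)
    · simp [stepA, hc, h, flushE, hv]
    · simp [stepA, hc, h, flushE, hv]

theorem stepA_slash {c : Char} (hs : c = '/')
    (paths : List String) (cur : List Char) (b : Bool) :
    stepA (paths, cur, b) c = (paths, cur ++ [c], true) := by
  subst hs
  simp [stepA, show pvCorrupted '/' = false from by decide]

theorem stepA_in {c : Char} (hc : pvCorrupted c = false) (hs : ¬ c = '/')
    (paths : List String) (cur : List Char) :
    stepA (paths, cur, true) c = (paths, cur ++ [c], true) := by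
  simp [stepA, hc, hs]

theorem stepA_out {c : Char} (hc : pvCorrupted c = false) (hs : ¬ c = '/')
    (paths : List String) (cur : List Char) :
    stepA (paths, cur, false) c = (paths, cur, false) := by
  simp [stepA, hc, hs]

theorem finishA_eq (paths : List String) (cur : List Char) (b : Bool) :
    finishA (paths, cur, b) = paths ++ flushE cur := by
  by_cases h : cur.isEmpty
  · simp [finishA, List.isEmpty_iff.mp h, flushE_nil]
  · by_cases hv : pvValid (PySem.Chars.strip cur)
    · simp [finishA, h, flushE, hv]
    · simp [finishA, h, flushE, hv]

theorem a_loop (cs : List Char) :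
    ∀ (paths : List String) (cur : List Char),
    finishA (cs.foldl stepA (paths, cur, !cur.isEmpty)) = paths ++ specS cur cs := by
  induction cs with
  | nil => intro paths cur; simp [finishA_eq, specS]
  | cons c cs ih =>
    intro paths cur
    simp only [List.foldl_cons, specS]
    cases hc : pvCorrupted c with
    | true =>
      rw [stepA_corr hc, if_pos rfl]
      have h1 := ih (paths ++ flushE cur) []
      simp only [List.isEmpty_nil, Bool.not_true] at h1
      rw [h1, List.append_assoc]
    | false =>
      rw [if_neg (by simp)]
      by_cases hs : c = '/'
      · rw [stepA_slash hs, if_pos hs]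
        have h1 := ih paths (cur ++ [c])
        have hb : (cur ++ [c]).isEmpty = false := by simp
        simp only [hb, Bool.not_false] at h1
        exact h1
      · rw [if_neg hs]
        by_cases h : cur.isEmpty
        · rw [if_pos h]
          have hb : (!cur.isEmpty) = false := by simp [h]
          rw [hb, stepA_out hc hs, ← hb]
          exact ih paths cur
        · rw [if_neg h]
          have hb : (!cur.isEmpty) = true := by simp [h]
          rw [hb, stepA_in hc hs]
          have h1 := ih paths (cur ++ [c])
          have hb2 : (cur ++ [c]).isEmpty = false := by simp
          simp only [hb2, Bool.not_false] at h1
          exact h1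

theorem b_split (cs : List Char) :
    ∀ (segs : List (List Char)) (cur : List Char),
    (let sp := cs.foldl stepB (segs, cur)
     sp.1 ++ [sp.2]) = segs ++ ((cur ++ (splitP cs).1) :: (splitP cs).2) := by
  induction cs with
  | nil => intro segs cur; simp [splitP]
  | cons c cs ih =>
    intro segs cur
    simp only [List.foldl_cons, splitP]
    cases hc : pvCorrupted c with
    | true =>
      rw [show stepB (segs, cur) c = (segs ++ [cur], []) by simp [stepB, hc]]
      have h1 := ih (segs ++ [cur]) []
      simp only at h1
      simp [h1]
    | false =>
      rw [show stepB (segs, cur) c = (segs, cur ++ [c]) by simp [stepB, hc]]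
      have h1 := ih segs (cur ++ [c])
      simp only at h1
      simp [h1]

theorem drop_index_eq_dropWhile (seg : List Char) (h : '/' ∈ seg) :
    seg.drop ((PySem.List.index? seg '/').getD 0) = seg.dropWhile (· ≠ '/') := by
  induction seg with
  | nil => cases h
  | cons c rest ih =>
    by_cases hc : c = '/'
    · subst hc
      rw [PySem.List.index?_cons_self]
      simp [List.dropWhile]
    · have hr : '/' ∈ rest := by
        cases h with
        | head => exact absurd rfl hc
        | tail _ h => exact h
      obtain ⟨i, hi⟩ := Option.isSome_iff_exists.mp
        ((PySem.List.index?_isSome_iff rest '/').mpr hr)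
      have hidx : PySem.List.index? (c :: rest) '/' = some (i + 1) := by
        rw [PySem.List.index?_cons_of_ne rest hc, hi]; rfl
      rw [hidx]
      simp only [Option.getD_some, List.drop_succ_cons, List.dropWhile]
      simp only [show (decide (c ≠ '/')) = true from by simp [hc]]
      rw [← ih hr, hi]
      rfl

theorem emitF_no_slash (seg : List Char) (h : '/' ∉ seg) : emitF seg = [] := by
  have hd : seg.dropWhile (· ≠ '/') = [] := by
    rw [List.dropWhile_eq_nil_iff]
    intro x hx
    simp only [ne_eq, decide_eq_true_eq]
    exact fun e => h (e ▸ hx)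
  unfold emitF
  rw [hd, flushE_nil]

theorem b_emit (segs : List (List Char)) :
    ∀ (paths : List String),
    segs.foldl emitStep paths = paths ++ segs.flatMap emitF := by
  induction segs with
  | nil => intro paths; simp
  | cons seg segs ih =>
    intro paths
    simp only [List.foldl_cons, List.flatMap_cons]
    by_cases h : '/' ∈ seg
    · have he : emitStep paths seg = paths ++ emitF seg := by
        simp only [emitStep, h, if_true, emitF, drop_index_eq_dropWhile seg h, flushE]
        split <;> simp
      rw [he, ih, List.append_assoc]
    · have he : emitStep paths seg = paths := by simp [emitStep, h]
      rw [he, ih, emitF_no_slash seg h]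
      simp

theorem emitF_cons_ne (c : Char) (s : List Char) (hs : ¬ c = '/') :
    emitF (c :: s) = emitF s := by
  unfold emitF
  rw [show (c :: s).dropWhile (· ≠ '/') = s.dropWhile (· ≠ '/') by
    simp [List.dropWhile, hs]]

theorem specS_eq (cs : List Char) :
    ∀ cur : List Char,
    specS cur cs =
      (if cur.isEmpty then emitF (splitP cs).1 else flushE (cur ++ (splitP cs).1))
        ++ (splitP cs).2.flatMap emitF := by
  induction cs with
  | nil =>
    intro cur
    by_cases h : cur.isEmpty
    · simp [specS, splitP, List.isEmpty_iff.mp h, emitF, flushE_nil]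
    · simp [specS, splitP, h]
  | cons c cs ih =>
    intro cur
    simp only [specS, splitP]
    cases hc : pvCorrupted c with
    | true =>
      rw [ih []]
      by_cases h : cur.isEmpty
      · simp [List.isEmpty_iff.mp h, flushE_nil, emitF, List.flatMap_cons]
      · simp [h, List.flatMap_cons]
    | false =>
      simp only [Bool.false_eq_true, if_false]
      by_cases hs : c = '/'
      · subst hs
        rw [ih (cur ++ ['/'])]
        have hne : (cur ++ ['/']).isEmpty = false := by simp
        by_cases h : cur.isEmpty
        · have hc0 : cur = [] := List.isEmpty_iff.mp h
          simp [hc0, emitF, List.dropWhile]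
        · simp [h, hne]
      · rw [if_neg hs]
        by_cases h : cur.isEmpty
        · rw [if_pos h, ih cur, if_pos h, if_pos h, emitF_cons_ne c _ hs]
        · rw [if_neg h, ih (cur ++ [c]), if_neg (by simp : ¬((cur ++ [c]).isEmpty = true)),
              if_neg h, List.append_assoc]
          rfl

-- ===== VERDICT (by name: the statement is the Claim_ definition above) =====
theorem extract_valid_paths_spec : Claim_equal_extract_valid_paths := by
  intro text _
  unfold Spec_extract_valid_paths extract_valid_paths extract_valid_paths_alt
  by_cases ht : text = ""
  · simp [ht]
  · simp only [ht, if_false]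
    have hA : finishA (text.toList.foldl stepA ([], [], false)) = specS [] text.toList := by
      have h1 := a_loop text.toList [] []
      simpa using h1
    rw [hA, b_split text.toList [] [], b_emit, specS_eq text.toList []]
    simp [List.flatMap_cons]
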